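-- pv_equiv track=rewrite | github.com/whoisorioki/dashboard | backend/services/data_transformation_service.py | _clean_csv_line
-- ===== SOURCE A (Python) =====
-- def _clean_csv_line(line: str) -> str:
--     """
--     Cleans a single CSV line by properly handling quoted fields with embedded commas.
--     """
--     # Remove any trailing whitespace
--     line = line.strip()
--
--     # If line is empty, return as-is
--     if not line:
--         return line + '\n'
--
--     # Use a more robust approach: split by comma but respect quoted fields
--     fields = []
--     current_field = ""
--     in_quotes = False
--     quote_count = 0
--     i = 0
--
--     while i < len(line):
--         char = line[i]
--
--         if char == '"':
--             quote_count += 1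
--             if quote_count % 2 == 1:  # Odd number of quotes
--                 in_quotes = True
--             else:  # Even number of quotes
--                 in_quotes = False
--             current_field += char
--             i += 1
--         elif char == ',' and not in_quotes:
--             # End of field
--             fields.append(current_field.strip())
--             current_field = ""
--             i += 1
--         else:
--             # Regular character
--             current_field += char
--             i += 1
--
--     # Add the last field
--     fields.append(current_field.strip())
--
--     # Ensure we have exactly 9 fields (the expected column count)
--     expected_fields = 9
--     if len(fields) > expected_fields:
--         # If we have too many fields, merge the extra ones into the last field
--         while len(fields) > expected_fields:
--             fields[-2] = fields[-2] + "," + fields[-1]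
--             fields.pop()
--     elif len(fields) < expected_fields:
--         # If we have too few fields, pad with empty strings
--         while len(fields) < expected_fields:
--             fields.append("")
--
--     # Clean each field
--     cleaned_fields = []
--     for field in fields:
--         # Remove surrounding quotes if they exist
--         if field.startswith('"') and field.endswith('"'):
--             field = field[1:-1]
--
--         # Clean the field content
--         cleaned_field = field.replace('\n', ' ').replace('\r', ' ').strip()
--         cleaned_fields.append(cleaned_field)
--
--     # Join fields back together
--     return ','.join(cleaned_fields) + '\n'
-- ===== SOURCE B (Python) =====
-- def _clean_csv_line(line: str) -> str:
--     """Split-and-rejoin re-implementation: split on ',' once, then use a running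
--     parity of '"' characters to re-attach the segments that fell inside quotes."""
--     line = line.strip()
--     if not line:
--         return line + '\n'
--
--     fields = []
--     quotes = 0
--     for seg in line.split(','):
--         if quotes % 2 == 0:
--             fields.append(seg)
--         else:
--             fields[-1] = fields[-1] + ',' + seg
--         quotes += seg.count('"')
--
--     fields = [f.strip() for f in fields]
--
--     if len(fields) >= 9:
--         fields = fields[:8] + [','.join(fields[8:])]
--     else:
--         fields = fields + [''] * (9 - len(fields))
--
--     cleaned = []
--     for f in fields:
--         if f.startswith('"') and f.endswith('"'):
--             f = f[1:-1]
--         cleaned.append(f.replace('\n', ' ').replace('\r', ' ').strip())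
--     return ','.join(cleaned) + '\n'
-- ===== Notes on version B (the rewrite author's own statement) =====
-- stated objective: faster
-- what changed: Replaces the character-by-character state-machine scan with one split on the comma separator followed by a single segment pass that re-attaches segments using a running parity of quote characters, and replaces the repeated-concatenation merge/pad while-loops with slicing plus one join and list arithmetic.
import Mathlib
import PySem

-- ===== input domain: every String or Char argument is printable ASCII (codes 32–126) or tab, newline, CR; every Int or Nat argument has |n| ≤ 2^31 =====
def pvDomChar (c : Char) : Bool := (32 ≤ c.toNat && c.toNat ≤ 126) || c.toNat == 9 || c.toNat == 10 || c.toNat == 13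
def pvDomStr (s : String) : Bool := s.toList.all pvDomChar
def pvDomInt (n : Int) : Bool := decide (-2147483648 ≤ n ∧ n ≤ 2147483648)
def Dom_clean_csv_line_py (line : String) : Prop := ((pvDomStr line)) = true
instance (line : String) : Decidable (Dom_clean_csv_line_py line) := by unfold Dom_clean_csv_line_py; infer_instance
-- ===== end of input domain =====

-- B re-implements A's character-by-character CSV scan as one split on the comma separator
-- re-joined by a running parity of quote characters, with the merge/pad while-loops replaced by
-- slicing plus a single join; same return value on every input (both are total); measured faster.

-- ===== PORT A =====
-- the while-loop over the characters: state (fields, current_field, in_quotes, quote_count)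
def pvAScan : List Char → List (List Char) → List Char → Bool → Nat → List (List Char)
  | [], fields, cur, _, _ => fields ++ [PySem.Chars.strip cur]
  | c :: rest, fields, cur, inq, qc =>
      if c = '"' then
        pvAScan rest fields (cur ++ [c]) (decide ((qc + 1) % 2 = 1)) (qc + 1)
      else if c = ',' ∧ inq = false then
        pvAScan rest (fields ++ [PySem.Chars.strip cur]) [] inq qc
      else
        pvAScan rest fields (cur ++ [c]) inq qc

-- while len(fields) > 9: fields[-2] = fields[-2] + "," + fields[-1]; fields.pop()
def pvAMerge (fields : List (List Char)) : List (List Char) :=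
  if 9 < fields.length then
    pvAMerge (fields.dropLast.dropLast ++
      [PySem.List.pyGetD fields (-2) [] ++ ',' :: PySem.List.pyGetD fields (-1) []])
  else fields
termination_by fields.length
decreasing_by simp_all; omega

-- while len(fields) < 9: fields.append("")
def pvAPad (fields : List (List Char)) : List (List Char) :=
  if fields.length < 9 then pvAPad (fields ++ [[]]) else fields
termination_by 9 - fields.length
decreasing_by simp_all; omega

-- per-field cleaning: strip surrounding quotes, replace '\n'/'\r' by ' ', strip
def pvAClean (field : List Char) : List Char :=
  let f := if PySem.Chars.startswith field ['"'] = true ∧ PySem.Chars.endswith field ['"'] = true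
           then PySem.Chars.slice field (some 1) (some (-1)) else field
  PySem.Chars.strip (PySem.Chars.replace (PySem.Chars.replace f ['\n'] [' ']) ['\r'] [' '])

def clean_csv_line_py (line : String) : String :=
  let l := PySem.Chars.strip line.toList
  if l = [] then String.ofList (l ++ ['\n'])
  else
    let fields := pvAScan l [] [] false 0
    let fields := if fields.length > 9 then pvAMerge fields
                  else if fields.length < 9 then pvAPad fields else fields
    let cleaned := fields.foldl (fun acc f => acc ++ [pvAClean f]) []
    String.ofList (PySem.Chars.join [','] cleaned ++ ['\n'])

-- ===== PORT B =====
-- one fold over the ','-split segments, carrying the running parity of '"' characters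
def pvBStep (st : List (List Char) × Nat) (seg : List Char) : List (List Char) × Nat :=
  if st.2 % 2 = 0 then (st.1 ++ [seg], st.2 + PySem.Chars.count seg ['"'])
  else (st.1.dropLast ++ [PySem.List.pyGetD st.1 (-1) [] ++ ',' :: seg],
        st.2 + PySem.Chars.count seg ['"'])

def pvBClean (f : List Char) : List Char :=
  let f := if PySem.Chars.startswith f ['"'] = true ∧ PySem.Chars.endswith f ['"'] = true
           then PySem.Chars.slice f (some 1) (some (-1)) else f
  PySem.Chars.strip (PySem.Chars.replace (PySem.Chars.replace f ['\n'] [' ']) ['\r'] [' '])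

def clean_csv_line_py_alt (line : String) : String :=
  let l := PySem.Chars.strip line.toList
  if l = [] then String.ofList (l ++ ['\n'])
  else
    let fields := ((PySem.Chars.splitOn l [',']).foldl pvBStep ([], 0)).1
    let fields := fields.map PySem.Chars.strip
    let fields := if 9 ≤ fields.length
                  then fields.take 8 ++ [PySem.Chars.join [','] (fields.drop 8)]
                  else fields ++ List.replicate (9 - fields.length) []
    String.ofList (PySem.Chars.join [','] (fields.map pvBClean) ++ ['\n'])

-- ===== PRECONDITION & SPEC =====
def Spec_clean_csv_line_py (line : String) (out : String) : Prop := out = clean_csv_line_py_alt line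
instance (line : String) (out : String) : Decidable (Spec_clean_csv_line_py line out) := by unfold Spec_clean_csv_line_py; infer_instance

-- ===== CLAIM (what is proved, stated in full; the proofs are below) =====
def Claim_equal_clean_csv_line_py : Prop := ∀ (line : String), Dom_clean_csv_line_py line → Spec_clean_csv_line_py line (clean_csv_line_py line)

-- ===== LEMMAS AND PROOFS =====

-- structural single-character split (proof-side mirror of splitOn l [','])
def pvSplit : List Char → List (List Char)
  | [] => [[]]
  | c :: rest => if c = ',' then [] :: pvSplit rest else (pvSplit rest).modifyHead (c :: ·)

-- the raw (unstripped) fields A's scan produces from state (cur, qc)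
def pvRaw : List Char → List Char → Nat → List (List Char)
  | [], cur, _ => [cur]
  | c :: rest, cur, qc =>
      if c = '"' then pvRaw rest (cur ++ [c]) (qc + 1)
      else if c = ',' ∧ qc % 2 = 0 then cur :: pvRaw rest [] qc
      else pvRaw rest (cur ++ [c]) qc

theorem pvModifyHead_id {a : Type} (l : List (List a)) :
    l.modifyHead (fun x => x) = l := by cases l <;> simp

theorem pvSplit_ne_nil (cs : List Char) : pvSplit cs ≠ [] := by
  cases cs with
  | nil => simp [pvSplit]
  | cons c rest =>
      simp only [pvSplit]
      split
      · simp
      · cases h : pvSplit rest with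
        | nil => exact absurd h (pvSplit_ne_nil rest)
        | cons a t => simp

theorem pvSplit_decomp (cs : List Char) :
    ∃ s1 rest, pvSplit cs = s1 :: rest ∧ cs = s1 ++ rest.flatMap (fun s => ',' :: s) := by
  induction cs with
  | nil => exact ⟨[], [], rfl, rfl⟩
  | cons c r ih =>
      obtain ⟨s1, rest, h1, h2⟩ := ih
      by_cases hc : c = ','
      · subst hc
        exact ⟨[], s1 :: rest, by simp [pvSplit, h1], by simp [h2]⟩
      · exact ⟨c :: s1, rest, by simp [pvSplit, hc, h1], by simp [h2]⟩

theorem pvSplit_comma_free (cs : List Char) : ∀ s ∈ pvSplit cs, ',' ∉ s := by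
  induction cs with
  | nil => simp [pvSplit]
  | cons c r ih =>
      by_cases hc : c = ','
      · subst hc; simpa [pvSplit] using ih
      · simp only [pvSplit, if_neg hc]
        cases h : pvSplit r with
        | nil => exact absurd h (pvSplit_ne_nil r)
        | cons a t =>
            intro s hs
            rw [h] at ih
            simp only [List.modifyHead] at hs
            rcases List.mem_cons.mp hs with hs' | hs'
            · subst hs'
              intro hmem
              rcases List.mem_cons.mp hmem with h' | h'
              · exact hc h'.symm
              · exact ih a (by simp) h'
            · exact ih s (by simp [hs'])

-- one unfolding of the fuel-based splitter
theorem pvGo_cons (fuel : Nat) (c : Char) (l cur : List Char) (acc : List (List Char)) :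
    PySem.Chars.splitOn.go [','] (fuel+1) (c :: l) cur acc =
      if c = ',' then PySem.Chars.splitOn.go [','] fuel l [] (cur.reverse :: acc)
      else PySem.Chars.splitOn.go [','] fuel l (c :: cur) acc := by
  rw [PySem.Chars.splitOn.go]
  by_cases hc : c = ','
  · subst hc; simp [List.isPrefixOf]
  · rw [if_neg hc]
    have h : [','].isPrefixOf (c :: l) = false := by simp [List.isPrefixOf, Ne.symm hc]
    simp [h]

theorem pvGo_eq (fuel : Nat) (l cur : List Char) (acc : List (List Char))
    (h : l.length ≤ fuel) :
    PySem.Chars.splitOn.go [','] fuel l cur acc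
      = acc.reverse ++ (pvSplit l).modifyHead (cur.reverse ++ ·) := by
  induction fuel generalizing l cur acc with
  | zero =>
      have : l = [] := List.eq_nil_of_length_eq_zero (Nat.le_zero.mp h)
      subst this
      simp [PySem.Chars.splitOn.go, pvSplit]
  | succ n ih =>
      cases l with
      | nil => simp [PySem.Chars.splitOn.go, pvSplit]
      | cons c t =>
          rw [pvGo_cons]
          simp only [List.length_cons] at h
          by_cases hc : c = ','
          · rw [if_pos hc, ih t [] _ (by omega)]
            subst hc
            simp [pvSplit, pvModifyHead_id]
          · rw [if_neg hc, ih t (c :: cur) acc (by omega)]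
            simp only [pvSplit, if_neg hc, List.modifyHead_modifyHead]
            have hfg : (fun x : List Char => (c :: cur).reverse ++ x)
                = ((fun x : List Char => cur.reverse ++ x) ∘ fun x => c :: x) := by
              funext x; simp
            rw [hfg]

theorem pvSplitOn_eq (cs : List Char) : PySem.Chars.splitOn cs [','] = pvSplit cs := by
  have := pvGo_eq (cs.length + 1) cs [] [] (by omega)
  simp only [PySem.Chars.splitOn] at *
  rw [this]
  simp [pvModifyHead_id]

-- one unfolding of the fuel-based substring counter
theorem pvCGo_cons (fuel : Nat) (c : Char) (l : List Char) (acc : Nat) :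
    PySem.Chars.count.go ['"'] (fuel+1) (c :: l) acc =
      if c = '"' then PySem.Chars.count.go ['"'] fuel l (acc+1)
      else PySem.Chars.count.go ['"'] fuel l acc := by
  rw [PySem.Chars.count.go]
  by_cases hc : c = '"'
  · subst hc; simp [List.isPrefixOf]
  · rw [if_neg hc]
    have h : ['"'].isPrefixOf (c :: l) = false := by simp [List.isPrefixOf, Ne.symm hc]
    simp [h]

theorem pvCGo_eq (fuel : Nat) (l : List Char) (acc : Nat) (h : l.length ≤ fuel) :
    PySem.Chars.count.go ['"'] fuel l acc = acc + l.count '"' := by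
  induction fuel generalizing l acc with
  | zero =>
      have : l = [] := List.eq_nil_of_length_eq_zero (Nat.le_zero.mp h)
      subst this
      simp [PySem.Chars.count.go]
  | succ n ih =>
      cases l with
      | nil => simp [PySem.Chars.count.go]
      | cons c t =>
          rw [pvCGo_cons]
          simp only [List.length_cons] at h
          by_cases hc : c = '"'
          · rw [if_pos hc, ih t _ (by omega)]
            simp [hc]; omega
          · rw [if_neg hc, ih t _ (by omega)]
            simp [hc]

theorem pvCount_singleton (s : List Char) : PySem.Chars.count s ['"'] = s.count '"' := by
  simpa [PySem.Chars.count] using pvCGo_eq s.length s 0 le_rfl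

-- scanning a comma-free chunk just extends the current field
theorem pvRaw_append_comma_free (s : List Char) (hs : ',' ∉ s) (t cur : List Char) (qc : Nat) :
    pvRaw (s ++ t) cur qc = pvRaw t (cur ++ s) (qc + s.count '"') := by
  induction s generalizing cur qc with
  | nil => simp
  | cons c r ih =>
      have hc : c ≠ ',' := fun h => hs (h ▸ List.mem_cons_self)
      have hr : ',' ∉ r := fun h => hs (List.mem_cons_of_mem _ h)
      by_cases hq : c = '"'
      · subst hq
        simp only [List.cons_append, pvRaw, if_pos]
        rw [ih hr]
        simp
        ring_nf
      · simp only [List.cons_append, pvRaw, if_neg hq]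
        rw [if_neg (by simp [hc]), ih hr]
        simp [hq]

-- B's fold over the remaining segments computes the raw fields of the remaining text
theorem pvFold_eq_raw (segs : List (List Char)) (hsegs : ∀ s ∈ segs, ',' ∉ s)
    (fs : List (List Char)) (cur : List Char) (qc : Nat) :
    (segs.foldl pvBStep (fs ++ [cur], qc)).1
      = fs ++ pvRaw (segs.flatMap (fun s => ',' :: s)) cur qc := by
  induction segs generalizing fs cur qc with
  | nil => simp [pvRaw]
  | cons s rest ih =>
      have hs : ',' ∉ s := hsegs s (by simp)
      have hrest : ∀ x ∈ rest, ',' ∉ x := fun x hx => hsegs x (by simp [hx])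
      simp only [List.foldl_cons, List.flatMap_cons, pvBStep]
      by_cases hq : qc % 2 = 0
      · rw [if_pos (by simpa using hq)]
        simp only [pvCount_singleton]
        rw [show fs ++ [cur] ++ [s] = (fs ++ [cur]) ++ [s] from rfl, ih hrest]
        simp only [pvRaw, List.cons_append]
        rw [if_neg (by decide), if_pos (by simp [hq]),
            pvRaw_append_comma_free s hs _ [] qc]
        simp
      · rw [if_neg (by simpa using hq)]
        simp only [pvCount_singleton, List.dropLast_concat]
        rw [show PySem.List.pyGetD (fs ++ [cur]) (-1) [] = cur by
              simp [PySem.List.pyGetD, PySem.List.pyGet?, PySem.List.pyIdx?]]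
        rw [ih hrest]
        simp only [pvRaw, List.cons_append]
        rw [if_neg (by decide), if_neg (by simp [hq]),
            pvRaw_append_comma_free s hs _ _ qc]
        simp

-- A's scan is the stripped raw fields
theorem pvAScan_eq_raw (cs : List Char) (fields : List (List Char)) (cur : List Char) (qc : Nat) :
    pvAScan cs fields cur (decide (qc % 2 = 1)) qc
      = fields ++ (pvRaw cs cur qc).map PySem.Chars.strip := by
  induction cs generalizing fields cur qc with
  | nil => simp [pvAScan, pvRaw]
  | cons c rest ih =>
      by_cases hq : c = '"'
      · subst hq
        simp only [pvAScan, pvRaw, if_pos]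
        exact ih fields _ (qc + 1)
      · simp only [pvAScan, pvRaw, if_neg hq]
        by_cases hc : c = ',' ∧ qc % 2 = 0
        · rw [if_pos ⟨hc.1, by have := hc.2; simp; omega⟩, if_pos hc, ih]
          simp
        · rw [if_neg (by
              rintro ⟨h1, h2⟩
              simp at h2
              exact hc ⟨h1, by omega⟩), if_neg hc]
          exact ih fields _ qc

-- merging the last two fields with a ',' does not change the joined result
theorem pvJoin_merge_two (sep : List Char) (xs : List (List Char)) (a b : List Char) :
    PySem.Chars.join sep (xs ++ [a ++ sep ++ b]) = PySem.Chars.join sep (xs ++ [a, b]) := by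
  induction xs with
  | nil =>
      simp [PySem.Chars.join_singleton, PySem.Chars.join_cons_cons]
  | cons x t ih =>
      cases t with
      | nil =>
          simp [PySem.Chars.join_singleton, PySem.Chars.join_cons_cons, List.append_assoc]
      | cons y u =>
          simp only [List.cons_append, PySem.Chars.join_cons_cons] at *
          rw [ih]

theorem pvExists_two {α : Type} (l : List α) (h : 2 ≤ l.length) :
    ∃ xs a b, l = xs ++ [a, b] := by
  rcases List.eq_nil_or_concat l with h1 | ⟨L, b, hb⟩
  · subst h1; simp at h
  · subst hb
    rcases List.eq_nil_or_concat L with h2 | ⟨M, a, ha⟩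
    · subst h2; simp at h
    · subst ha; exact ⟨M, a, b, by simp⟩

theorem pvAMerge_eq (fields : List (List Char)) (h : 9 ≤ fields.length) :
    pvAMerge fields = fields.take 8 ++ [PySem.Chars.join [','] (fields.drop 8)] := by
  by_cases h9 : 9 < fields.length
  · obtain ⟨xs, a, b, hd⟩ := pvExists_two fields (by omega)
    subst hd
    have hxs : 8 ≤ xs.length := by simp at h9 ⊢; omega
    rw [pvAMerge]
    rw [if_pos (by simpa using h9)]
    have hga : PySem.List.pyGetD (xs ++ [a, b]) (-2) [] = a := by
      simp [PySem.List.pyGetD, PySem.List.pyGet?, PySem.List.pyIdx?]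
    have hgb : PySem.List.pyGetD (xs ++ [a, b]) (-1) [] = b := by
      simp [PySem.List.pyGetD, PySem.List.pyGet?, PySem.List.pyIdx?]
    have hdl : (xs ++ [a, b]).dropLast.dropLast = xs := by
      simp
    rw [hga, hgb, hdl]
    rw [pvAMerge_eq (xs ++ [a ++ ',' :: b]) (by simp; omega)]
    have hc : a ++ ',' :: b = a ++ [','] ++ b := by simp
    rw [List.take_append_of_le_length (by omega), List.take_append_of_le_length (by omega),
        List.drop_append_of_le_length (by omega), List.drop_append_of_le_length (by omega)]
    rw [hc, pvJoin_merge_two]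
  · -- exactly 9 fields: both sides are fields itself
    have h9' : fields.length = 9 := by omega
    rw [pvAMerge, if_neg (by omega)]
    obtain ⟨x, hx⟩ : ∃ x, fields.drop 8 = [x] := by
      have : (fields.drop 8).length = 1 := by simp [h9']
      cases hd : fields.drop 8 with
      | nil => rw [hd] at this; simp at this
      | cons y t =>
          rw [hd] at this; simp at this
          exact ⟨y, by simp [this]⟩
    rw [hx, PySem.Chars.join_singleton, ← hx, List.take_append_drop]
termination_by fields.length
decreasing_by subst hd; simp only [List.length_append, List.length_cons]; omega

theorem pvAPad_eq (fields : List (List Char)) :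
    pvAPad fields = fields ++ List.replicate (9 - fields.length) [] := by
  by_cases h : fields.length < 9
  · rw [pvAPad, if_pos h, pvAPad_eq (fields ++ [[]])]
    have : 9 - fields.length = (9 - (fields.length + 1)) + 1 := by omega
    rw [this, List.replicate_succ]
    simp
  · rw [pvAPad, if_neg h]
    have : 9 - fields.length = 0 := by omega
    simp [this]
termination_by 9 - fields.length
decreasing_by simp; omega

theorem pvClean_eq : pvAClean = pvBClean := rfl

-- ===== VERDICT (by name: the statement is the Claim_ definition above) =====
theorem clean_csv_line_py_spec : Claim_equal_clean_csv_line_py := by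
  intro line _
  unfold Spec_clean_csv_line_py clean_csv_line_py clean_csv_line_py_alt
  simp only []
  by_cases hl : PySem.Chars.strip line.toList = []
  · simp [hl]
  · rw [if_neg hl, if_neg hl]
    set l := PySem.Chars.strip line.toList with hldef
    -- the two field lists agree
    obtain ⟨s1, rest, hsp, hdec⟩ := pvSplit_decomp l
    have hcf := pvSplit_comma_free l
    have hAfields : pvAScan l [] [] false 0 = (pvRaw l [] 0).map PySem.Chars.strip := by
      have := pvAScan_eq_raw l [] [] 0
      simpa using this
    have hBfields : ((PySem.Chars.splitOn l [',']).foldl pvBStep ([], 0)).1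
        = pvRaw l [] 0 := by
      rw [pvSplitOn_eq, hsp]
      have hs1 : ',' ∉ s1 := hcf s1 (by rw [hsp]; simp)
      have hrest : ∀ x ∈ rest, ',' ∉ x := fun x hx => hcf x (by rw [hsp]; simp [hx])
      simp only [List.foldl_cons, pvBStep]
      rw [if_pos (by simp)]
      simp only [pvCount_singleton]
      rw [show ([] : List (List Char)) ++ [s1] = [] ++ [s1] from rfl,
          pvFold_eq_raw rest hrest [] s1 (0 + s1.count '"')]
      conv_rhs => rw [hdec, pvRaw_append_comma_free s1 hs1 _ [] 0]
      simp
    rw [hAfields, hBfields.symm]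
    set F := (((PySem.Chars.splitOn l [',']).foldl pvBStep ([], 0)).1).map PySem.Chars.strip
      with hF
    -- normalisation agrees
    have hnorm : (if F.length > 9 then pvAMerge F
                  else if F.length < 9 then pvAPad F else F)
        = (if 9 ≤ F.length then F.take 8 ++ [PySem.Chars.join [','] (F.drop 8)]
           else F ++ List.replicate (9 - F.length) []) := by
      by_cases h1 : 9 < F.length
      · rw [if_pos h1, if_pos (by omega), pvAMerge_eq F (by omega)]
      · rw [if_neg h1]
        by_cases h2 : F.length < 9
        · rw [if_pos h2, if_neg (by omega), pvAPad_eq]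
        · have h9 : F.length = 9 := by omega
          rw [if_neg h2, if_pos (by omega)]
          rw [← pvAMerge_eq F (by omega), pvAMerge, if_neg (by omega)]
    rw [hnorm]
    rw [PySem.List.foldl_append_singleton_eq_map pvAClean _ []]
    rw [pvClean_eq]
    simp
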